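-- pv_equiv track=rewrite | github.com/nukeykt/virushack | parse_radius_logs.py | is_login_correct
-- ===== SOURCE A (Python) =====
-- import string
--
-- def is_login_correct(line):
--     """Проверяет логин на возможность расшифровки ip-коммутатора"""
--     line = line.split('@dhcp')[0].split()[-1]
--     line = line.replace("'", '')
--     line = line.lower()
--     if len(line.split('-')) != 2:
--         return False
--     left, right = line.split('-')
--
--     def is_hex(s):
--         return all(c in string.hexdigits for c in s)
--
--     return is_hex(left) and is_hex(right)
-- ===== SOURCE B (Python) =====
-- import string
--
-- def is_login_correct(line):
--     """Проверяет логин на возможность расшифровки ip-коммутатора"""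
--     tok = line.split('@dhcp')[0].split()[-1]
--     dashes = 0
--     for c in tok:
--         if c == "'":
--             continue
--         if c == '-':
--             dashes += 1
--         elif c not in string.hexdigits:
--             return False
--     return dashes == 1
-- ===== Notes on version B (the rewrite author's own statement) =====
-- stated objective: simpler
-- what changed: B replaces A's replace/lower/split-into-two-parts pipeline with the is_hex helper by a single pass over the token that skips quotes, counts dashes and rejects the first non-hex character; the lower() call disappears because string.hexdigits is case-closed.
import Mathlib
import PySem

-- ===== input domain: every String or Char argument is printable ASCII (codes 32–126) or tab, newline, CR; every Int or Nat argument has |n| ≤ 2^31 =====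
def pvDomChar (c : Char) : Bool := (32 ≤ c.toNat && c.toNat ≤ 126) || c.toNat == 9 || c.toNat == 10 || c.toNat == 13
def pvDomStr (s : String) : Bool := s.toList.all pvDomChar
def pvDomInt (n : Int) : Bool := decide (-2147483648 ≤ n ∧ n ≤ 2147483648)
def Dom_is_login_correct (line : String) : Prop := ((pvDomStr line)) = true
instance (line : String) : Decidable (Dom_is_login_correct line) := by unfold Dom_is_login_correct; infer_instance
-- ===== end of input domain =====

-- B replaces A's replace/lower/two-way-split pipeline by one pass over the token that skips quotes,
-- counts dashes and rejects non-hex characters (lower() drops out: string.hexdigits is case-closed). Same return value.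

-- ===== PORT A =====
-- string.hexdigits
def pyHexdigits : List Char := "0123456789abcdefABCDEF".toList

-- A's inner helper is_hex
def a_is_hex (s : List Char) : Bool := s.all (fun c => pyHexdigits.contains c)

def is_login_correct (line : String) : Bool :=
  let head := (PySem.Chars.splitOn line.toList "@dhcp".toList).headD []
  match PySem.List.pyGet? (PySem.Chars.split₀ head) (-1) with
  | none => false      -- Python raises IndexError here; excluded by Pre_
  | some tok =>
    let tok := PySem.Chars.replace tok "'".toList []
    let tok := PySem.Chars.lower tok
    if (PySem.Chars.splitOn tok ['-']).length ≠ 2 then false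
    else
      match PySem.Chars.splitOn tok ['-'] with
      | [left, right] => a_is_hex left && a_is_hex right
      | _ => false

-- ===== PORT B =====
-- B's single pass: skip quotes, count dashes, reject the first non-hex character
def b_loop : List Char → Nat → Bool
  | [], dashes => dashes == 1
  | c :: rest, dashes =>
    if c = '\'' then b_loop rest dashes
    else if c = '-' then b_loop rest (dashes + 1)
    else if pyHexdigits.contains c then b_loop rest dashes
    else false

def is_login_correct_alt (line : String) : Bool :=
  let head := (PySem.Chars.splitOn line.toList "@dhcp".toList).headD []
  match PySem.List.pyGet? (PySem.Chars.split₀ head) (-1) with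
  | none => false      -- Python raises IndexError here; excluded by Pre_
  | some tok => b_loop tok 0

-- ===== PRECONDITION & SPEC =====
-- Pre_ excludes exactly the lines whose part before '@dhcp' is empty or whitespace-only:
-- there `.split()[-1]` raises IndexError in Python (in A and in B alike).
def Pre_is_login_correct (line : String) : Prop :=
  PySem.Chars.split₀ ((PySem.Chars.splitOn line.toList "@dhcp".toList).headD []) ≠ []
instance (line : String) : Decidable (Pre_is_login_correct line) := by
  unfold Pre_is_login_correct; infer_instance

def pvWitness_is_login_correct : String := "aa-bb"

def Spec_is_login_correct (line : String) (out : Bool) : Prop := out = is_login_correct_alt line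
instance (line : String) (out : Bool) : Decidable (Spec_is_login_correct line out) := by
  unfold Spec_is_login_correct; infer_instance

-- ===== CLAIM (what is proved, stated in full; the proofs are below) =====
def Claim_equal_is_login_correct : Prop :=
  ∀ (line : String), Dom_is_login_correct line → Pre_is_login_correct line →
    Spec_is_login_correct line (is_login_correct line)

-- ===== LEMMAS AND PROOFS =====

-- structural counterpart of splitOn s ['-'] (used only in the proofs)
def mySplitDash : List Char → List Char → List (List Char)
  | [], cur => [cur.reverse]
  | c :: rest, cur =>
    if c = '-' then cur.reverse :: mySplitDash rest [] else mySplitDash rest (c :: cur)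

-- the character class B's loop accepts ( '-' or hex ), used only in the proofs
def goodCh (c : Char) : Bool := (c == '-') || pyHexdigits.contains c

lemma splitOn_go_eq (fuel : Nat) :
    ∀ (l cur : List Char) (accs : List (List Char)), l.length < fuel →
      PySem.Chars.splitOn.go ['-'] fuel l cur accs = accs.reverse ++ mySplitDash l cur := by
  induction fuel with
  | zero => intro l cur accs h; omega
  | succ f ih =>
    intro l cur accs h
    cases l with
    | nil => simp [PySem.Chars.splitOn.go, mySplitDash]
    | cons c rest =>
      by_cases hc : c = '-'
      · subst hc
        rw [PySem.Chars.splitOn.go]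
        simp only [List.isPrefixOf, List.length_cons] at *
        rw [if_pos (by simp)]
        simp only [List.length_singleton, List.drop_succ_cons, List.length_nil, List.drop_zero]
        rw [ih rest [] (cur.reverse :: accs) (by simp at h; omega)]
        simp [mySplitDash]
      · rw [PySem.Chars.splitOn.go]
        rw [if_neg (by simp [List.isPrefixOf]; intro h'; exact hc h'.symm)]
        rw [ih rest (c :: cur) accs (by simp at h ⊢; omega)]
        simp [mySplitDash, hc]

lemma splitOn_dash (u : List Char) : PySem.Chars.splitOn u ['-'] = mySplitDash u [] := by
  have := splitOn_go_eq (u.length + 1) u [] [] (by omega)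
  simpa [PySem.Chars.splitOn] using this

lemma replace_go_eq (fuel : Nat) :
    ∀ (l acc : List Char), l.length ≤ fuel →
      PySem.Chars.replace.go ['\''] [] fuel l acc
        = acc.reverse ++ l.filter (fun c => c != '\'') := by
  induction fuel with
  | zero =>
    intro l acc h
    have : l = [] := by cases l <;> simp_all
    subst this
    simp [PySem.Chars.replace.go]
  | succ f ih =>
    intro l acc h
    cases l with
    | nil => simp [PySem.Chars.replace.go]
    | cons c rest =>
      by_cases hc : c = '\''
      · subst hc
        rw [PySem.Chars.replace.go]
        rw [if_pos (by simp [List.isPrefixOf])]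
        simp only [List.length_singleton, List.drop_succ_cons, List.length_nil, List.drop_zero,
          List.reverse_nil, List.nil_append]
        rw [ih rest acc (by simp at h; omega)]
        simp
      · rw [PySem.Chars.replace.go]
        rw [if_neg (by simp [List.isPrefixOf]; intro h'; exact hc h'.symm)]
        rw [ih rest (c :: acc) (by simp at h ⊢; omega)]
        simp [hc]

lemma replace_quote (tok : List Char) :
    PySem.Chars.replace tok "'".toList [] = tok.filter (fun c => c != '\'') := by
  have : ("'".toList : List Char) = ['\''] := rfl
  rw [this, PySem.Chars.replace]
  simp only [List.isEmpty_cons, if_neg]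
  exact replace_go_eq tok.length tok [] le_rfl

lemma mySplitDash_length (u : List Char) :
    ∀ cur, (mySplitDash u cur).length = u.count '-' + 1 := by
  induction u with
  | nil => intro cur; simp [mySplitDash]
  | cons c rest ih =>
    intro cur
    by_cases hc : c = '-'
    · subst hc; simp [mySplitDash, ih, List.count_cons]
    · simp [mySplitDash, hc, ih, List.count_cons]

lemma mySplitDash_nodash (u : List Char) :
    ∀ cur, u.count '-' = 0 → mySplitDash u cur = [cur.reverse ++ u] := by
  induction u with
  | nil => intro cur _; simp [mySplitDash]
  | cons c rest ih =>
    intro cur h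
    simp [List.count_cons] at h
    have hc : ¬ c = '-' := by
      intro hcc; simp [hcc] at h
    rw [mySplitDash, if_neg hc, ih (c :: cur) (by omega)]
    simp

lemma mySplitDash_split (a b : List Char) (ha : a.count '-' = 0) :
    ∀ cur, mySplitDash (a ++ '-' :: b) cur = (cur.reverse ++ a) :: mySplitDash b [] := by
  induction a with
  | nil => intro cur; simp [mySplitDash]
  | cons c rest ih =>
    intro cur
    simp [List.count_cons] at ha
    have hc : ¬ c = '-' := by intro hcc; simp [hcc] at ha
    rw [List.cons_append, mySplitDash, if_neg hc, ih (by omega) (c :: cur)]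
    simp

lemma count_one_decomp (u : List Char) (h : u.count '-' = 1) :
    ∃ a b, u = a ++ '-' :: b ∧ a.count '-' = 0 ∧ b.count '-' = 0 := by
  induction u with
  | nil => simp at h
  | cons c rest ih =>
    by_cases hc : c = '-'
    · subst hc
      refine ⟨[], rest, by simp, by simp, ?_⟩
      simp [List.count_cons] at h; omega
    · have hr : rest.count '-' = 1 := by simp [List.count_cons, hc] at h; omega
      obtain ⟨a, b, rfl, ha, hb⟩ := ih hr
      exact ⟨c :: a, b, by simp, by simp [List.count_cons, hc, ha], hb⟩

lemma all_good_nodash (u : List Char) (h : u.count '-' = 0) :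
    u.all goodCh = a_is_hex u := by
  induction u with
  | nil => rfl
  | cons c rest ih =>
    simp only [List.count_cons] at h
    have hc : ¬ c = '-' := by intro hcc; simp [hcc] at h
    have : (c == '-') = false := by simp [hc]
    simp [List.all_cons, goodCh, this, a_is_hex, ih (by omega)]

lemma a_core (u : List Char) :
    (if (PySem.Chars.splitOn u ['-']).length ≠ 2 then false
     else
       match PySem.Chars.splitOn u ['-'] with
       | [left, right] => a_is_hex left && a_is_hex right
       | _ => false)
    = (u.all goodCh && (u.count '-' == 1)) := by
  rw [splitOn_dash]
  by_cases h : u.count '-' = 1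
  · obtain ⟨a, b, rfl, ha, hb⟩ := count_one_decomp u h
    rw [mySplitDash_split a b ha [], mySplitDash_nodash b [] hb]
    simp only [List.reverse_nil, List.nil_append, List.length_cons, List.length_nil]
    rw [if_neg (by omega)]
    have h1 : (a ++ '-' :: b).count '-' == 1 := by simp [h]
    simp only [h1, Bool.and_true]
    rw [List.all_append, List.all_cons]
    have hd : goodCh '-' = true := by decide
    rw [hd, all_good_nodash a ha, all_good_nodash b hb]
    simp
  · have hl := mySplitDash_length u []
    rw [if_pos (by omega)]
    have h1 : (u.count '-' == 1) = false := by simp [h]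
    simp [h1]

lemma lowerChar_dash (c : Char) :
    (PySem.Chars.lowerChar c == '-') = (c == '-') := by
  by_cases h : PySem.Chars.isupper c = true
  · simp only [PySem.Chars.isupper, Bool.and_eq_true, decide_eq_true_eq] at h
    obtain ⟨h1, h2⟩ := h
    have l1 : 65 ≤ c.toNat := h1
    have l2 : c.toNat ≤ 90 := h2
    interval_cases hn : c.toNat <;> (rw [← Char.ofNat_toNat c, hn]; decide)
  · simp [PySem.Chars.lowerChar, h]

lemma lowerChar_hex (c : Char) :
    pyHexdigits.contains (PySem.Chars.lowerChar c) = pyHexdigits.contains c := by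
  by_cases h : PySem.Chars.isupper c = true
  · simp only [PySem.Chars.isupper, Bool.and_eq_true, decide_eq_true_eq] at h
    obtain ⟨h1, h2⟩ := h
    have l1 : 65 ≤ c.toNat := h1
    have l2 : c.toNat ≤ 90 := h2
    interval_cases hn : c.toNat <;> (rw [← Char.ofNat_toNat c, hn]; decide)
  · simp [PySem.Chars.lowerChar, h]

lemma goodCh_lower (c : Char) : goodCh (PySem.Chars.lowerChar c) = goodCh c := by
  simp only [goodCh, lowerChar_dash, lowerChar_hex]

lemma map_lower_all (u : List Char) :
    (u.map PySem.Chars.lowerChar).all goodCh = u.all goodCh := by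
  induction u with
  | nil => rfl
  | cons c rest ih => simp [goodCh_lower, ih]

lemma map_lower_count (u : List Char) :
    (u.map PySem.Chars.lowerChar).count '-' = u.count '-' := by
  simp only [List.count, List.countP_map]
  refine List.countP_congr (fun c _ => ?_)
  simp only [Function.comp_apply, beq_iff_eq]
  constructor <;> intro hx
  · have : (c == '-') = true := by rw [← lowerChar_dash c]; simp [hx]
    simpa using this
  · subst hx; have : (PySem.Chars.lowerChar '-' == '-') = true := by decide
    simpa using this

lemma b_loop_eq (tok : List Char) :
    ∀ d, b_loop tok d
      = ((tok.filter (fun c => c != '\'')).all goodCh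
          && (d + (tok.filter (fun c => c != '\'')).count '-' == 1)) := by
  induction tok with
  | nil => intro d; simp [b_loop]
  | cons c rest ih =>
    intro d
    by_cases hq : c = '\''
    · subst hq
      rw [b_loop, if_pos rfl, ih d]
      simp
    · by_cases hd : c = '-'
      · subst hd
        rw [b_loop, if_neg (by decide), if_pos rfl, ih (d + 1)]
        have hf : ((('-' : Char) :: rest).filter (fun c => c != '\'')) =
            '-' :: rest.filter (fun c => c != '\'') := by simp
        rw [hf, List.all_cons, List.count_cons]
        have hg : goodCh '-' = true := by decide
        rw [hg]
        have hxy : d + 1 + List.count '-' (List.filter (fun c => c != '\'') rest)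
            = d + (List.count '-' (List.filter (fun c => c != '\'') rest)
                + if ('-' : Char) == '-' then 1 else 0) := by simp; omega
        rw [hxy]
        simp
      · by_cases hh : pyHexdigits.contains c = true
        · rw [b_loop, if_neg hq, if_neg hd, if_pos hh, ih d]
          have hf : ((c :: rest).filter (fun x => x != '\'')) =
              c :: rest.filter (fun x => x != '\'') := by simp [hq]
          rw [hf, List.all_cons, List.count_cons]
          have hg : goodCh c = true := by unfold goodCh; rw [hh]; simp
          have hcd : (c == '-') = false := by simp [hd]
          rw [hg, hcd]
          simp
        · rw [b_loop, if_neg hq, if_neg hd, if_neg hh]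
          have hf : ((c :: rest).filter (fun x => x != '\'')) =
              c :: rest.filter (fun x => x != '\'') := by simp [hq]
          rw [hf, List.all_cons]
          have hg : goodCh c = false := by
            simp only [goodCh, Bool.or_eq_false_iff]
            exact ⟨by simp [hd], by simpa using hh⟩
          rw [hg]
          simp

-- ===== VERDICT (by name: the statement is the Claim_ definition above) =====
theorem is_login_correct_spec : Claim_equal_is_login_correct := by
  intro line _ _
  show is_login_correct line = is_login_correct_alt line
  simp only [is_login_correct, is_login_correct_alt]
  cases h : PySem.List.pyGet? (PySem.Chars.split₀
      ((PySem.Chars.splitOn line.toList "@dhcp".toList).headD [])) (-1) with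
  | none => rfl
  | some tok =>
    dsimp only
    rw [replace_quote]
    show (if (PySem.Chars.splitOn (PySem.Chars.lower (tok.filter (fun c => c != '\''))) ['-']).length ≠ 2
          then false
          else
            match PySem.Chars.splitOn (PySem.Chars.lower (tok.filter (fun c => c != '\''))) ['-'] with
            | [left, right] => a_is_hex left && a_is_hex right
            | _ => false)
        = b_loop tok 0
    rw [a_core, PySem.Chars.lower, map_lower_all, map_lower_count, b_loop_eq tok 0, Nat.zero_add]
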